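-- pv_equiv track=rewrite | github.com/anikin02/algorithms | cw.py | my_first_interpreter
-- ===== SOURCE A (Python) =====
-- def my_first_interpreter(code):
--     i = 0
--     message = ''
--     for n in code:
--         if n in '+':
--             i = (i + 1) % 256
--         elif n in '.':
--             message += chr(i)
--     return message
-- ===== SOURCE B (Python) =====
-- def my_first_interpreter(code):
--     parts = code.split('.')
--     i = 0
--     out = []
--     for part in parts[:-1]:
--         i = (i + part.count('+')) % 256
--         out.append(chr(i))
--     return ''.join(out)
-- ===== Notes on version B (the rewrite author's own statement) =====
-- stated objective: faster
-- what changed: B splits the program on dots once and, per inter-dot segment, adds that segment's plus-count to the counter in one step and emits one character, instead of A's per-character state machine.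
import Mathlib
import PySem

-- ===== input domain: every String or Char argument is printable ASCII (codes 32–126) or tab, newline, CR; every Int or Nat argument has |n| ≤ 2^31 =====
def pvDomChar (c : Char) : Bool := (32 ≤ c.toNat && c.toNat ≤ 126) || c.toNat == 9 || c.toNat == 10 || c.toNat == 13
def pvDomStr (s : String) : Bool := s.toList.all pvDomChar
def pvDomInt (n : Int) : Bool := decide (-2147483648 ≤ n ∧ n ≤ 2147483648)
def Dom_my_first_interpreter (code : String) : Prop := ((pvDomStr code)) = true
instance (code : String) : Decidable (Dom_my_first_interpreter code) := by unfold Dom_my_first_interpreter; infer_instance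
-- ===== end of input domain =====

-- B interprets the '+'/'.' program by splitting on '.' and counting '+' per segment instead of
-- A's per-character state machine (objective: faster; a timing run measured B faster).

-- ===== PORT A =====
-- Python str values are carried as List Char inside the loop (String.ofList at the return);
-- 'n in "+"' / 'n in "."' is PySem.Chars.isIn on singletons, exact.
-- loop body of A, named so the fold lemmas below can talk about it
def pvStepA (st : Int × List Char) (n : Char) : Int × List Char :=
  if PySem.Chars.isIn [n] ['+'] then (PySem.Int.mod (st.1 + 1) 256, st.2)
  else if PySem.Chars.isIn [n] ['.'] then (st.1, st.2 ++ [Char.ofNat st.1.toNat])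
  else st

def my_first_interpreter (code : String) : String :=
  String.ofList (code.toList.foldl pvStepA ((0 : Int), ([] : List Char))).2

-- ===== PORT B =====
-- code.split('.') with the one-char separator '.' is exactly List.splitOn '.' on the code
-- points, part.count('+') for the one-char needle is exactly List.count '+',
-- parts[:-1] is dropLast, ''.join(out) is PySem.Str.join "".
-- loop body of B: i = (i + part.count('+')) % 256; out.append(chr(i))
def pvStepB (st : Int × List String) (part : List Char) : Int × List String :=
  let i := PySem.Int.mod (st.1 + (part.count '+' : Int)) 256
  (i, st.2 ++ [String.ofList [Char.ofNat i.toNat]])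

def my_first_interpreter_alt (code : String) : String :=
  PySem.Str.join ""
    ((code.toList.splitOn '.').dropLast.foldl pvStepB ((0 : Int), ([] : List String))).2

-- ===== PRECONDITION & SPEC =====
def Spec_my_first_interpreter (code : String) (out : String) : Prop := out = my_first_interpreter_alt code
instance (code : String) (out : String) : Decidable (Spec_my_first_interpreter code out) := by unfold Spec_my_first_interpreter; infer_instance

-- ===== CLAIM (what is proved, stated in full; the proofs are below) =====
def Claim_equal_my_first_interpreter : Prop := ∀ (code : String), Dom_my_first_interpreter code → Spec_my_first_interpreter code (my_first_interpreter code)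

-- ===== LEMMAS AND PROOFS =====

-- membership of a 1-char string in a 1-char string is equality
theorem pvIsIn_singleton (n c : Char) : PySem.Chars.isIn [n] [c] = (n == c) := by
  by_cases h : n = c
  · subst h
    simp [PySem.Chars.isIn_iff_infix]
  · apply Bool.eq_false_iff.mpr ?_ |>.trans (by simp [h])
    intro hin
    rcases (PySem.Chars.isIn_iff_infix _ _).mp hin with ⟨s, t, hst⟩
    have : s = [] ∧ t = [] := by
      have hl := congrArg List.length hst
      simp at hl
      constructor <;> (apply List.eq_nil_of_length_eq_zero; omega)
    rcases this with ⟨rfl, rfl⟩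
    simp at hst
    exact h hst

-- the common reference recursion: one character at a time
def pvInterp : List Char → Int → List Char
  | [], _ => []
  | c :: cs, i =>
    if c == '+' then pvInterp cs ((i + 1) % 256)
    else if c == '.' then Char.ofNat i.toNat :: pvInterp cs i
    else pvInterp cs i

-- B's per-segment recursion
def pvRun : List (List Char) → Int → List Char
  | [], _ => []
  | p :: ps, i =>
    Char.ofNat (((i + (p.count '+' : Int)) % 256).toNat) ::
      pvRun ps ((i + (p.count '+' : Int)) % 256)

theorem pvA_loop (cs : List Char) (i : Int) (acc : List Char) (hi : 0 ≤ i) :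
    (cs.foldl pvStepA (i, acc)).2 = acc ++ pvInterp cs i := by
  induction cs generalizing i acc with
  | nil => simp [pvInterp]
  | cons c cs ih =>
    rw [List.foldl_cons]
    by_cases h1 : c = '+'
    · have hs : pvStepA (i, acc) c = ((i + 1) % 256, acc) := by
        simp [pvStepA, pvIsIn_singleton, h1]
      have hnn : (0 : Int) ≤ (i + 1) % 256 := Int.emod_nonneg _ (by norm_num)
      rw [hs, ih _ _ hnn]
      simp [pvInterp, h1]
    · by_cases h2 : c = '.'
      · have hs : pvStepA (i, acc) c = (i, acc ++ [Char.ofNat i.toNat]) := by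
          simp [pvStepA, pvIsIn_singleton, h2]
        rw [hs, ih _ _ hi]
        simp [pvInterp, h2]
      · have hs : pvStepA (i, acc) c = (i, acc) := by
          simp [pvStepA, pvIsIn_singleton, h1, h2]
        rw [hs, ih _ _ hi]
        simp [pvInterp, h1, h2]

theorem pvB_loop (parts : List (List Char)) (i : Int) (out : List String) (hi : 0 ≤ i) :
    (parts.foldl pvStepB (i, out)).2
      = out ++ (pvRun parts i).map (fun c => String.ofList [c]) := by
  induction parts generalizing i out with
  | nil => simp [pvRun]
  | cons p ps ih =>
    rw [List.foldl_cons]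
    have hs : pvStepB (i, out) p
        = ((i + (p.count '+' : Int)) % 256,
           out ++ [String.ofList [Char.ofNat (((i + (p.count '+' : Int)) % 256).toNat)]]) := by
      simp [pvStepB]
    have hnn : (0 : Int) ≤ (i + (p.count '+' : Int)) % 256 := Int.emod_nonneg _ (by norm_num)
    rw [hs, ih _ _ hnn]
    simp [pvRun]

-- the core correspondence: p is the pending prefix of the first segment, counter i ∈ [0, 256)
theorem pvCore (cs : List Char) (p : List Char) (i : Int) (h0 : 0 ≤ i) (h1 : i < 256) :
    pvRun ((List.modifyHead (p ++ ·) (cs.splitOn '.')).dropLast) i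
      = pvInterp cs ((i + (p.count '+' : Int)) % 256) := by
  induction cs generalizing p i with
  | nil =>
    simp [List.splitOn, List.splitOnP_nil, List.modifyHead, pvRun, pvInterp]
  | cons c cs ih =>
    by_cases hdot : c = '.'
    · subst hdot
      have hsp := List.splitOnP_ne_nil (fun x => x == '.') cs
      simp only [List.splitOn, List.splitOnP_cons, beq_self_eq_true, if_pos, List.modifyHead,
        List.append_nil]
      rw [List.dropLast_cons_of_ne_nil hsp]
      simp only [pvRun, pvInterp]
      rw [if_neg (by decide : ¬ ((('.' : Char) == '+') = true)),
        if_pos (by decide : ((('.' : Char) == '.') = true))]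
      set j : Int := (i + (p.count '+' : Int)) % 256 with hj
      have hj0 : (0 : Int) ≤ j := Int.emod_nonneg _ (by norm_num)
      have hj1 : j < 256 := Int.emod_lt_of_pos _ (by norm_num)
      have hmh : List.modifyHead (fun q => [] ++ q) (cs.splitOn '.') = cs.splitOn '.' := by
        cases h : cs.splitOn '.' <;> simp [List.modifyHead]
      have hih := ih [] j hj0 hj1
      rw [hmh] at hih
      simp only [List.count_nil, Nat.cast_zero, add_zero] at hih
      have : j % 256 = j := by omega
      rw [this] at hih
      simp only [List.splitOn] at hih
      rw [hih]
    · have hbeq : (c == '.') = false := by simp [hdot]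
      simp only [List.splitOn, List.splitOnP_cons, hbeq, Bool.false_eq_true, if_neg,
        not_false_iff]
      have hmh : List.modifyHead (p ++ ·) (List.modifyHead (List.cons c) (cs.splitOnP (· == '.')))
          = List.modifyHead ((p ++ [c]) ++ ·) (cs.splitOnP (· == '.')) := by
        cases h : cs.splitOnP (· == '.') <;> simp [List.modifyHead]
      rw [hmh]
      have hih := ih (p ++ [c]) i h0 h1
      simp only [List.splitOn] at hih
      rw [hih]
      by_cases hplus : c = '+'
      · subst hplus
        simp only [pvInterp, beq_self_eq_true, if_pos]
        congr 1
        simp [List.count_append]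
        omega
      · have hpb : (c == '+') = false := by simp [hplus]
        simp only [pvInterp, hpb, hbeq, Bool.false_eq_true, if_neg, not_false_iff]
        congr 2
        simp [List.count_append, hplus]

-- ===== VERDICT (by name: the statement is the Claim_ definition above) =====
theorem my_first_interpreter_spec : Claim_equal_my_first_interpreter := by
  intro code _
  show my_first_interpreter code = my_first_interpreter_alt code
  unfold my_first_interpreter my_first_interpreter_alt
  rw [pvA_loop _ _ _ le_rfl, pvB_loop _ _ _ le_rfl]
  have hmh : List.modifyHead (fun q => [] ++ q) (code.toList.splitOn '.')
      = code.toList.splitOn '.' := by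
    cases h : code.toList.splitOn '.' <;> simp [List.modifyHead]
  have hcore := pvCore code.toList [] 0 le_rfl (by norm_num)
  rw [hmh] at hcore
  simp only [List.count_nil, Nat.cast_zero, add_zero, Int.zero_emod] at hcore
  rw [hcore]
  simp only [List.nil_append]
  unfold PySem.Str.join
  rw [List.map_map]
  have hcomp : (String.toList ∘ fun c => String.ofList [c]) = fun c => [c] := by
    funext c; simp
  rw [hcomp, show ("" : String).toList = ([] : List Char) from rfl, PySem.Chars.join_nil_singletons]
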